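-- pv_equiv track=rewrite | github.com/Chis-Denis/Babes-Bolyai-University | Semester 5/LFTC/Lab7/first_follow.py | compute_first_of_sequence
-- ===== SOURCE A (Python) =====
-- from typing import Dict, Set, List
--
-- def compute_first_of_sequence(sequence: List[str], first_sets: Dict[str, Set[str]]) -> Set[str]:
--     """Compute FIRST set for a sequence of symbols"""
--     if not sequence:
--         return {'ε'}
--
--     result = set()
--     all_have_epsilon = True
--
--     for symbol in sequence:
--         first_symbol = first_sets.get(symbol, set())
--         result.update(first_symbol - {'ε'})
--
--         if 'ε' not in first_symbol:
--             all_have_epsilon = False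
--             break
--
--     if all_have_epsilon:
--         result.add('ε')
--
--     return result
-- ===== SOURCE B (Python) =====
-- def compute_first_of_sequence(sequence, first_sets):
--     """Compute FIRST set for a sequence of symbols.
--
--     Structural recursion instead of A's loop-with-flag-and-break:
--     FIRST([]) = {epsilon}; FIRST(x::rest) = (FIRST(x) \ {epsilon}) union
--     FIRST(rest) if epsilon in FIRST(x), else just FIRST(x) \ {epsilon}.
--     The epsilon in the result comes from the base case, not a flag.
--     """
--     if not sequence:
--         return {'ε'}
--     f = first_sets.get(sequence[0], set())
--     base = f - {'ε'}
--     if 'ε' in f: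
--         return base | compute_first_of_sequence(sequence[1:], first_sets)
--     return base
-- ===== Notes on version B (the rewrite author's own statement) =====
-- stated objective: alternative
-- what changed: Replaces A's iterative accumulate-and-break loop carrying a result set and an all_have_epsilon flag by the textbook structural recursion FIRST([])={eps}, FIRST(x::rest)=(FIRST(x)-{eps}) | FIRST(rest) when eps is in FIRST(x) else FIRST(x)-{eps}: no mutable accumulator, no flag, and the final epsilon arises from the base case instead of a post-loop flag test.
import Mathlib
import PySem

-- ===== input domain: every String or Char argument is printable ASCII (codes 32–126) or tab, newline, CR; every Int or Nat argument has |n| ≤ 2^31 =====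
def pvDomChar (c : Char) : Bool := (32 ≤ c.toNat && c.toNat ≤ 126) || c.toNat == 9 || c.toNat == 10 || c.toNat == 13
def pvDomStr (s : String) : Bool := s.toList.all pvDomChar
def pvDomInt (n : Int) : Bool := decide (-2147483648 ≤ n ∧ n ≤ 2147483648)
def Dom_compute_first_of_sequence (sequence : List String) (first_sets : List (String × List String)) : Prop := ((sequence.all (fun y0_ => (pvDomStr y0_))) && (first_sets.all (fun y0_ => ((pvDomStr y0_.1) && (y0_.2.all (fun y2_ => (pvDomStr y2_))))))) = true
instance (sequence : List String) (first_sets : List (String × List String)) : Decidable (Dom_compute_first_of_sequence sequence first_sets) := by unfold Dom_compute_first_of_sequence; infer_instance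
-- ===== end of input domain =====

-- B replaces A's accumulate-and-break loop with flag by the textbook structural recursion for FIRST of a sequence (alternative shape, same cost).


-- ===== PORT A =====
-- A's for-loop: carries (result, all_have_epsilon); breaks on a FIRST set without 'ε'.
def pvALoop (first_sets : List (String × List String)) : List String → PySem.Set String → PySem.Set String × Bool
  | [], result => (result, true)
  | symbol :: rest, result =>
      let first_symbol := ((PySem.Dict.mk first_sets).get? symbol).getD []
      let result := PySem.Set.update result (PySem.Set.diff first_symbol ["ε"])
      if PySem.Set.contains first_symbol "ε" then pvALoop first_sets rest result
      else (result, false)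

def compute_first_of_sequence (sequence : List String) (first_sets : List (String × List String)) : List String :=
  if sequence = [] then ["ε"]
  else
    match pvALoop first_sets sequence PySem.Set.empty with
    | (result, all_have_epsilon) =>
        if all_have_epsilon then PySem.Set.add result "ε" else result

-- ===== PORT B =====
-- Structural recursion: FIRST([]) = {'ε'}; FIRST(x::rest) = (FIRST(x)∖{'ε'}) ∪ FIRST(rest) if 'ε' ∈ FIRST(x), else FIRST(x)∖{'ε'}.
def compute_first_of_sequence_alt (sequence : List String) (first_sets : List (String × List String)) : List String :=
  match sequence with
  | [] => ["ε"]
  | head :: rest =>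
      let f := ((PySem.Dict.mk first_sets).get? head).getD []
      let base := PySem.Set.diff f ["ε"]
      if PySem.Set.contains f "ε"
      then PySem.Set.union base (compute_first_of_sequence_alt rest first_sets)
      else base

-- ===== PRECONDITION & SPEC =====
-- Pre_ only says the dict's values are genuine Python sets (no duplicate elements): a value list with
-- duplicates represents no Python input at all (a set cannot contain duplicates), so nothing A returns on is excluded.
def Pre_compute_first_of_sequence (sequence : List String) (first_sets : List (String × List String)) : Prop :=
  ∀ p ∈ first_sets, p.2.Nodup
instance (sequence : List String) (first_sets : List (String × List String)) : Decidable (Pre_compute_first_of_sequence sequence first_sets) := by unfold Pre_compute_first_of_sequence; infer_instance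
def pvWitness_compute_first_of_sequence : List String × (List (String × List String)) :=
  (["S", "a"], [("S", ["x", "y"]), ("a", ["a"])])

def Spec_compute_first_of_sequence (sequence : List String) (first_sets : List (String × List String)) (out : List String) : Prop := out = compute_first_of_sequence_alt sequence first_sets
instance (sequence : List String) (first_sets : List (String × List String)) (out : List String) : Decidable (Spec_compute_first_of_sequence sequence first_sets out) := by unfold Spec_compute_first_of_sequence; infer_instance

-- ===== CLAIM (what is proved, stated in full; the proofs are below) =====
def Claim_equal_compute_first_of_sequence : Prop := ∀ (sequence : List String) (first_sets : List (String × List String)), Dom_compute_first_of_sequence sequence first_sets → Pre_compute_first_of_sequence sequence first_sets → Spec_compute_first_of_sequence sequence first_sets (compute_first_of_sequence sequence first_sets)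

-- ===== LEMMAS AND PROOFS =====
-- any value get? returns is one of the stored value lists
lemma pvGet?_mem (fs : List (String × List String)) (k : String) (v : List String)
    (h : (PySem.Dict.mk fs).get? k = some v) : ∃ p ∈ fs, p.2 = v := by
  unfold PySem.Dict.get? at h
  obtain ⟨p, hp, hv⟩ := Option.map_eq_some_iff.mp h
  exact ⟨p, List.mem_of_find?_eq_some hp, hv⟩

-- adding one element commutes past an update
lemma pvUpdate_add (acc b : List String) (x : String) :
    PySem.Set.update acc (PySem.Set.add b x) = PySem.Set.add (PySem.Set.update acc b) x := by
  by_cases hx : x ∈ b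
  · have hx2 : x ∈ PySem.Set.update acc b := (PySem.Set.mem_update _ _ _).mpr (Or.inr hx)
    rw [PySem.Set.add_of_mem hx, PySem.Set.add_of_mem hx2]
  · rw [PySem.Set.add_of_not_mem hx]
    simp [PySem.Set.update, List.foldl_append, PySem.Set.add]

-- 'update' associates: update acc (update b r) = update (update acc b) r
lemma pvUpdate_assoc (acc b r : List String) :
    PySem.Set.update acc (PySem.Set.update b r) = PySem.Set.update (PySem.Set.update acc b) r := by
  induction r generalizing acc b with
  | nil => rfl
  | cons x r' ih =>
      rw [PySem.Set.update_cons, PySem.Set.update_cons, ih, pvUpdate_add]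

-- B's recursion yields a Nodup list
lemma pvAlt_nodup (fs : List (String × List String)) (hv : ∀ p ∈ fs, p.2.Nodup) :
    ∀ seq : List String, (compute_first_of_sequence_alt seq fs).Nodup := by
  intro seq
  induction seq with
  | nil => simp [compute_first_of_sequence_alt]
  | cons head rest ih =>
      have hf : (((PySem.Dict.mk fs).get? head).getD []).Nodup := by
        cases hg : (PySem.Dict.mk fs).get? head with
        | none => simp
        | some v =>
            obtain ⟨p, hp, hpv⟩ := pvGet?_mem fs head v hg
            simpa [hpv] using hv p hp
      have hb : (PySem.Set.diff (((PySem.Dict.mk fs).get? head).getD []) ["ε"]).Nodup :=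
        PySem.Set.nodup_diff _ _ hf
      show (if PySem.Set.contains (((PySem.Dict.mk fs).get? head).getD []) "ε" = true
          then PySem.Set.union (PySem.Set.diff (((PySem.Dict.mk fs).get? head).getD []) ["ε"])
                 (compute_first_of_sequence_alt rest fs)
          else PySem.Set.diff (((PySem.Dict.mk fs).get? head).getD []) ["ε"]).Nodup
      split
      · exact PySem.Set.nodup_update _ _ hb
      · exact hb

-- A's break-loop, followed by the flag-driven ε-add, equals acc updated with B's recursive FIRST
lemma pvALoop_alt (fs : List (String × List String)) :
    ∀ (seq : List String) (acc : List String),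
      (if (pvALoop fs seq acc).2 then PySem.Set.add (pvALoop fs seq acc).1 "ε" else (pvALoop fs seq acc).1)
        = PySem.Set.update acc (compute_first_of_sequence_alt seq fs) := by
  intro seq
  induction seq with
  | nil => intro acc; rfl
  | cons head rest ih =>
      intro acc
      unfold pvALoop compute_first_of_sequence_alt
      by_cases hc : PySem.Set.contains (((PySem.Dict.mk fs).get? head).getD []) "ε" = true
      · rw [if_pos hc, if_pos hc, ih, PySem.Set.union, pvUpdate_assoc]
      · rw [if_neg hc, if_neg hc]
        simp

-- ===== VERDICT (by name: the statement is the Claim_ definition above) =====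
theorem compute_first_of_sequence_spec : Claim_equal_compute_first_of_sequence := by
  intro sequence first_sets _ hpre
  unfold Spec_compute_first_of_sequence
  rcases sequence with _ | ⟨x, rest⟩
  · rfl
  · have h := pvALoop_alt first_sets (x :: rest) PySem.Set.empty
    rcases hm : pvALoop first_sets (x :: rest) PySem.Set.empty with ⟨r, b⟩
    rw [hm] at h
    unfold compute_first_of_sequence
    rw [if_neg (List.cons_ne_nil x rest), hm]
    show (if b = true then PySem.Set.add r "ε" else r)
        = compute_first_of_sequence_alt (x :: rest) first_sets
    rw [h, PySem.Set.update_empty]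
    exact PySem.Set.ofList_eq_self_of_nodup _ (pvAlt_nodup first_sets hpre (x :: rest))
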